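-- pv_equiv track=rewrite | github.com/DavidVentura/translator-rs | scripts/generate_samples_site.py | normalize_sample_name
-- ===== SOURCE A (Python) =====
-- def normalize_sample_name(value: str) -> str:
--     chars: list[str] = []
--     last_was_sep = False
--     for ch in value:
--         keep = ch.isalnum() or ch in "_.-"
--         if keep:
--             chars.append(ch)
--             last_was_sep = False
--         elif not last_was_sep:
--             chars.append("_")
--             last_was_sep = True
--     return "".join(chars).strip("_")
-- ===== SOURCE B (Python) =====
-- def normalize_sample_name(value: str) -> str:
--     def keep(ch: str) -> bool:
--         return ch.isalnum() or ch in "_.-"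
--     parts: list[str] = []
--     i, n = 0, len(value)
--     while i < n:
--         k = keep(value[i])
--         j = i
--         while j < n and keep(value[j]) == k:
--             j += 1
--         parts.append(value[i:j] if k else "_")
--         i = j
--     return "".join(parts).strip("_")
-- ===== Notes on version B (the rewrite author's own statement) =====
-- stated objective: alternative
-- what changed: Replaces the per-character state-flag loop with a run scanner: a two-pointer loop finds each maximal run of kept/non-kept characters and emits the whole run (or one underscore) per group.
import Mathlib
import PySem

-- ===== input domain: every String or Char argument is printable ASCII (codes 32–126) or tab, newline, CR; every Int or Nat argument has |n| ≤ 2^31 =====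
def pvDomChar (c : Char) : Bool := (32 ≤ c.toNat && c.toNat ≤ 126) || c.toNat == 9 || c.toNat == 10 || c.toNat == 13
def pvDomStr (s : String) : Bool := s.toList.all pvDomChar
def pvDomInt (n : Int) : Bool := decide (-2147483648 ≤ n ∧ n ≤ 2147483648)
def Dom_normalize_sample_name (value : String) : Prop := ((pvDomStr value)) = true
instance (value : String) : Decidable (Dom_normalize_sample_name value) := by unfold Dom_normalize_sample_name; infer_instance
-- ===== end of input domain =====

-- B replaces A's per-character state-flag loop with a run scanner over maximal groups; same O(n) cost.

-- shared keep-predicate: ch.isalnum() or ch in "_.-" (identical expression in both Pythons)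
def keepChar (c : Char) : Bool := PySem.Chars.isalnum c || (c = '_' || c = '.' || c = '-')

-- ===== PORT A =====
-- A's loop body: append kept char / single '_' per separator run, tracking last_was_sep
def stepA (st : List Char × Bool) (ch : Char) : List Char × Bool :=
  if keepChar ch then (st.1 ++ [ch], false)
  else if !st.2 then (st.1 ++ ['_'], true)
  else st

def normalize_sample_name (value : String) : String :=
  PySem.Str.stripChars (String.ofList (value.toList.foldl stepA ([], false)).1) "_"

-- ===== PORT B =====
-- B's outer loop: each iteration consumes one maximal run of equal keep-key and
-- emits the run itself (kept) or a single '_' (the inner j-scan is takeWhile/dropWhile)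
def runsB : List Char → List Char
  | [] => []
  | c :: cs =>
    (if keepChar c then c :: cs.takeWhile (fun x => keepChar x == keepChar c) else ['_'])
      ++ runsB (cs.dropWhile (fun x => keepChar x == keepChar c))
termination_by l => l.length
decreasing_by
  simp only [List.length_cons]
  exact Nat.lt_succ_of_le (List.length_dropWhile_le _ _)

def normalize_sample_name_alt (value : String) : String :=
  PySem.Str.stripChars (String.ofList (runsB value.toList)) "_"

-- ===== PRECONDITION & SPEC =====
def Spec_normalize_sample_name (value : String) (out : String) : Prop := out = normalize_sample_name_alt value
instance (value : String) (out : String) : Decidable (Spec_normalize_sample_name value out) := by unfold Spec_normalize_sample_name; infer_instance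

-- ===== CLAIM (what is proved, stated in full; the proofs are below) =====
def Claim_equal_normalize_sample_name : Prop := ∀ (value : String), Dom_normalize_sample_name value → Spec_normalize_sample_name value (normalize_sample_name value)

-- ===== LEMMAS AND PROOFS =====

-- A's loop as a pure recursion over (input, last_was_sep)
def recA : List Char → Bool → List Char
  | [], _ => []
  | c :: cs, last =>
    if keepChar c then c :: recA cs false
    else if last then recA cs last
    else '_' :: recA cs true

theorem foldl_eq_recA (l : List Char) (acc : List Char) (last : Bool) :
    (l.foldl stepA (acc, last)).1 = acc ++ recA l last := by
  induction l generalizing acc last with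
  | nil => simp [recA]
  | cons c cs ih =>
    simp only [List.foldl_cons]
    by_cases hk : keepChar c
    · rw [show stepA (acc, last) c = (acc ++ [c], false) from by simp [stepA, hk]]
      rw [ih]; simp [recA, hk]
    · cases last with
      | false =>
        rw [show stepA (acc, false) c = (acc ++ ['_'], true) from by simp [stepA, hk]]
        rw [ih]; simp [recA, hk]
      | true =>
        rw [show stepA (acc, true) c = (acc, true) from by simp [stepA, hk]]
        rw [ih]; simp [recA, hk]

theorem recA_true (l : List Char) :
    recA l true = recA (l.dropWhile (fun x => keepChar x == false)) false := by
  induction l with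
  | nil => simp [recA]
  | cons c cs ih =>
    by_cases hk : keepChar c
    · simp [recA, hk]
    · have hk' : keepChar c = false := by simpa using hk
      rw [List.dropWhile_cons]
      simp [recA, hk', ih]

theorem recA_false_keep (l : List Char) :
    recA l false =
      l.takeWhile (fun x => keepChar x == true)
        ++ recA (l.dropWhile (fun x => keepChar x == true)) false := by
  induction l with
  | nil => simp
  | cons c cs ih =>
    by_cases hk : keepChar c
    · simp [recA, hk, ih]
    · simp [recA, hk]

theorem recA_eq_runsB (l : List Char) : recA l false = runsB l := by
  induction hn : l.length using Nat.strong_induction_on generalizing l with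
  | _ n ih =>
  cases l with
  | nil => simp [recA, runsB]
  | cons c cs =>
    by_cases hk : keepChar c
    · have h2 : recA (cs.dropWhile (fun x => keepChar x == true)) false
          = runsB (cs.dropWhile (fun x => keepChar x == true)) := by
        refine ih (cs.dropWhile (fun x => keepChar x == true)).length ?_ _ rfl
        subst hn
        exact Nat.lt_succ_of_le (List.length_dropWhile_le _ _)
      calc recA (c :: cs) false
          = c :: (cs.takeWhile (fun x => keepChar x == true)
              ++ runsB (cs.dropWhile (fun x => keepChar x == true))) := by
            rw [show recA (c :: cs) false = c :: recA cs false from by simp [recA, hk],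
              recA_false_keep cs, h2]
        _ = runsB (c :: cs) := by rw [runsB]; simp [hk]
    · have h2 : recA (cs.dropWhile (fun x => keepChar x == false)) false
          = runsB (cs.dropWhile (fun x => keepChar x == false)) := by
        refine ih (cs.dropWhile (fun x => keepChar x == false)).length ?_ _ rfl
        subst hn
        exact Nat.lt_succ_of_le (List.length_dropWhile_le _ _)
      calc recA (c :: cs) false
          = '_' :: runsB (cs.dropWhile (fun x => keepChar x == false)) := by
            rw [show recA (c :: cs) false = '_' :: recA cs true from by simp [recA, hk],
              recA_true cs, h2]
        _ = runsB (c :: cs) := by rw [runsB]; simp [hk]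

-- ===== VERDICT (by name: the statement is the Claim_ definition above) =====
theorem normalize_sample_name_spec : Claim_equal_normalize_sample_name := by
  intro value _
  unfold Spec_normalize_sample_name normalize_sample_name normalize_sample_name_alt
  rw [foldl_eq_recA, recA_eq_runsB]
  simp
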